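-- pv_equiv track=rewrite | github.com/danielcagostinho/aoc2025 | daniel/day06/solution.py | part1
-- ===== SOURCE A (Python) =====
-- def evaluate_expression(expression: tuple[str, ...]) -> int:
--     operator = expression[-1]
--     operands = [int(x) for x in expression[:-1]]
--     if operator == "+":
--         return sum(operands)
--     else:
--         result = 1
--         for num in operands:
--             result *= num
--         return result
--
-- def part1(data: str) -> int:
--     rows = [line.split() for line in data.split("\n")]
--     total = 0
--     cols = list(zip(*rows))
--     for col in cols:
--         result = evaluate_expression(col)
--         total += result
--     return total
-- ===== SOURCE B (Python) =====
-- def part1(data: str) -> int: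
--     # Single row-major pass: per-column (sum, product) accumulators instead of
--     # transposing with zip and evaluating each column separately.
--     rows = [line.split() for line in data.split("\n")]
--     width = min(len(r) for r in rows)
--     acc = [(0, 1)] * width
--     for row in rows[:-1]:
--         acc = [(s + int(t), p * int(t)) for (s, p), t in zip(acc, row)]
--     return sum(s if op == "+" else p for (s, p), op in zip(acc, rows[-1]))
-- ===== Notes on version B (the rewrite author's own statement) =====
-- stated objective: simpler
-- what changed: B replaces A's transpose-then-evaluate (zip(*rows) plus a per-column helper) by a single row-major pass that carries one (sum, product) pair per column and combines them with the operator row at the end.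
import Mathlib
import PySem

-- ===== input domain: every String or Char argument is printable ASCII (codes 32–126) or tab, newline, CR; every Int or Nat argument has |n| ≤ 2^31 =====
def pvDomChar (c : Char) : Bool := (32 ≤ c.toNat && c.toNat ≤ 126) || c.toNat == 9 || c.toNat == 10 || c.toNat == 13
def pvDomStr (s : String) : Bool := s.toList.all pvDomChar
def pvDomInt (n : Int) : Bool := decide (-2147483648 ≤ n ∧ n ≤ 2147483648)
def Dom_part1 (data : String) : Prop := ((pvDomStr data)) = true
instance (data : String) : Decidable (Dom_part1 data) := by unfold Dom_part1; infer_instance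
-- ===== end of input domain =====

-- B replaces A's transpose-then-evaluate-each-column by a single row-major pass with one
-- (sum, product) accumulator per column; same cost, plainer shape (objective: simpler).

-- shared helpers (both Pythons call int(), data.split("\n"), line.split(), min of row lengths)
-- int(x); Pre_part1 excludes the inputs where int() raises ValueError, so the default is never reached
def pyIntD (s : String) : Int := (PySem.Int.ofStr? s).getD 0

-- rows = [line.split() for line in data.split("\n")]; split? is some since the separator is nonempty
def rowsOf (data : String) : List (List String) :=
  ((PySem.Str.split? data "\n").getD []).map PySem.Str.split₀

-- min(len(r) for r in rows)  (first argument is the running minimum)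
def minLen (rows : List (List String)) : Nat :=
  match rows with
  | [] => 0
  | r :: rs => rs.foldl (fun m x => min m x.length) r.length

-- ===== PORT A =====
-- list(zip(*rows)): take heads while every row is nonempty
def pyZip : List (List String) → List (List String)
  | [] => []
  | r :: rs =>
    if (r :: rs).any List.isEmpty then []
    else ((r :: rs).map (fun x => x.headD "")) :: pyZip ((r :: rs).map List.tail)
termination_by rows => (rows.headD []).length
decreasing_by
  rename_i hne
  simp only [List.any_cons, Bool.or_eq_true, List.isEmpty_iff, not_or] at hne
  simp only [List.map_cons, List.headD_cons, List.length_tail]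
  cases r with
  | nil => exact absurd rfl hne.1
  | cons a l => simp

def evaluate_expression (expression : List String) : Int :=
  let operator := PySem.List.pyGetD expression (-1) ""   -- expression[-1]; columns are nonempty
  let operands := expression.dropLast.map pyIntD          -- expression[:-1] = dropLast, exact
  if operator = "+" then
    operands.foldl (· + ·) 0
  else
    operands.foldl (fun result num => result * num) 1

def part1 (data : String) : Int :=
  let rows := rowsOf data
  let cols := pyZip rows
  cols.foldl (fun total col => total + evaluate_expression col) 0

-- ===== PORT B =====
def part1_alt (data : String) : Int :=
  let rows := rowsOf data
  let width := minLen rows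
  let acc := rows.dropLast.foldl
    (fun acc row =>
      List.zipWith (fun (sp : Int × Int) t => (sp.1 + pyIntD t, sp.2 * pyIntD t)) acc row)
    (List.replicate width ((0 : Int), (1 : Int)))
  (List.zipWith (fun (sp : Int × Int) op => if op = "+" then sp.1 else sp.2)
      acc (PySem.List.pyGetD (rowsOf data) (-1) [])).foldl (· + ·) 0

-- ===== PRECONDITION & SPEC =====
-- Pre_ excludes exactly the inputs where Python A raises ValueError: a token of a
-- number row (all rows but the last), at a column index below the minimum row width,
-- that int() does not accept.
def Pre_part1 (data : String) : Prop :=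
  ∀ r ∈ (rowsOf data).dropLast, ∀ j < minLen (rowsOf data),
    (PySem.Int.ofStr? (r.getD j "")).isSome = true
instance (data : String) : Decidable (Pre_part1 data) := by unfold Pre_part1; infer_instance

def pvWitness_part1 : String := "1 2\n30 4\n+ *"

def Spec_part1 (data : String) (out : Int) : Prop := out = part1_alt data
instance (data : String) (out : Int) : Decidable (Spec_part1 data out) := by unfold Spec_part1; infer_instance

-- ===== CLAIM (what is proved, stated in full; the proofs are below) =====
def Claim_equal_part1 : Prop := ∀ (data : String), Dom_part1 data → Pre_part1 data → Spec_part1 data (part1 data)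

-- ===== LEMMAS AND PROOFS =====

theorem foldl_min_len_eq_zero (rs : List (List String)) (b : Nat) :
    rs.foldl (fun m x => min m x.length) b = 0 ↔ b = 0 ∨ ∃ x ∈ rs, x.length = 0 := by
  induction rs generalizing b with
  | nil => simp
  | cons r rs ih =>
    simp only [List.foldl_cons, ih, List.mem_cons]
    constructor
    · rintro (h | ⟨x, hx, hl⟩)
      · rcases Nat.min_eq_zero_iff.mp h with h | h
        · exact Or.inl h
        · exact Or.inr ⟨r, Or.inl rfl, h⟩
      · exact Or.inr ⟨x, Or.inr hx, hl⟩
    · rintro (h | ⟨x, (rfl | hx), hl⟩)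
      · exact Or.inl (by omega)
      · exact Or.inl (by omega)
      · exact Or.inr ⟨x, hx, hl⟩

theorem minLen_eq_zero_iff (rows : List (List String)) (h : rows ≠ []) :
    minLen rows = 0 ↔ rows.any List.isEmpty = true := by
  cases rows with
  | nil => exact absurd rfl h
  | cons r rs =>
    simp only [minLen, foldl_min_len_eq_zero, List.any_cons, List.any_eq_true,
      List.isEmpty_iff, Bool.or_eq_true, List.length_eq_zero_iff]

theorem foldl_min_len_sub_one (rs : List (List String)) (b : Nat) :
    rs.foldl (fun m x => min m (x.length - 1)) (b - 1)
      = rs.foldl (fun m x => min m x.length) b - 1 := by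
  induction rs generalizing b with
  | nil => rfl
  | cons r rs ih =>
    simp only [List.foldl_cons]
    rw [show min (b - 1) (r.length - 1) = min b r.length - 1 by omega, ih]

theorem minLen_map_tail (rows : List (List String)) :
    minLen (rows.map List.tail) = minLen rows - 1 := by
  cases rows with
  | nil => rfl
  | cons r rs =>
    simp only [minLen, List.map_cons, List.foldl_map, List.length_tail]
    exact foldl_min_len_sub_one rs r.length

theorem headD_eq_getD' (r : List String) : r.head?.getD "" = r[0]?.getD "" := by
  cases r <;> rfl

theorem minLen_le_of_mem (rows : List (List String)) (r : List String) (h : r ∈ rows) :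
    minLen rows ≤ r.length := by
  cases rows with
  | nil => simp at h
  | cons a rs =>
    have hfold : rs.foldl (fun m x => min m x.length) a.length
        = (rs.map List.length).foldl min a.length := by
      rw [List.foldl_map]
    rcases List.mem_cons.mp h with rfl | hr
    · simpa only [minLen, hfold] using (PySem.List.foldl_min_le (rs.map List.length) r.length).1
    · simpa only [minLen, hfold] using
        (PySem.List.foldl_min_le (rs.map List.length) a.length).2 r.length
          (List.mem_map_of_mem hr)

theorem getD_tail (r : List String) (j : Nat) : r.tail.getD j "" = r.getD (j + 1) "" := by
  cases r <;> simp

theorem pyZip_eq (rows : List (List String)) (h : rows ≠ []) :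
    pyZip rows = (List.range (minLen rows)).map (fun j => rows.map (fun r => r.getD j "")) := by
  induction hw : minLen rows generalizing rows with
  | zero =>
    cases rows with
    | nil => exact absurd rfl h
    | cons r rs =>
      have hany : (r :: rs).any List.isEmpty = true := (minLen_eq_zero_iff _ h).mp hw
      simp [pyZip, hany]
  | succ n ih =>
    cases rows with
    | nil => exact absurd rfl h
    | cons r rs =>
      have hany : (r :: rs).any List.isEmpty = false := by
        by_contra hc
        have : (r :: rs).any List.isEmpty = true := by
          cases hx : (r :: rs).any List.isEmpty <;> simp_all
        rw [(minLen_eq_zero_iff _ h).mpr this] at hw; omega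
      have htail : minLen ((r :: rs).map List.tail) = n := by
        rw [minLen_map_tail, hw]; omega
      have hrec := ih ((r :: rs).map List.tail) (by simp) htail
      simp only [pyZip, hany, Bool.false_eq_true, if_false, hrec]
      rw [List.range_succ_eq_map]
      simp only [List.map_cons, List.map_map]
      congr 1
      · simp [headD_eq_getD']
      · apply List.map_congr_left
        intro j _
        simp only [Function.comp, getD_tail]
        congr 1
        exact List.map_congr_left fun x _ => getD_tail x j

theorem zipWith_map_range {α β γ : Type} (f : α → β → γ) (d : β) (w : Nat) (g : Nat → α)
    (r : List β) (h : w ≤ r.length) :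
    List.zipWith f ((List.range w).map g) r
      = (List.range w).map (fun j => f (g j) (r.getD j d)) := by
  induction w generalizing g r with
  | zero => simp
  | succ n ih =>
    cases r with
    | nil => simp at h
    | cons b bs =>
      rw [List.range_succ_eq_map]
      simp only [List.map_cons, List.map_map, List.zipWith_cons_cons]
      rw [ih (g ∘ Nat.succ) bs (by simpa using h)]
      simp [Function.comp, List.getD]

theorem foldl_rows_acc (nrs : List (List String)) (w : Nat) (g : Nat → Int × Int)
    (h : ∀ r ∈ nrs, w ≤ r.length) :
    nrs.foldl
      (fun acc row =>
        List.zipWith (fun (sp : Int × Int) t => (sp.1 + pyIntD t, sp.2 * pyIntD t)) acc row)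
      ((List.range w).map g)
      = (List.range w).map (fun j =>
          (nrs.foldl (fun s r => s + pyIntD (r.getD j "")) (g j).1,
           nrs.foldl (fun p r => p * pyIntD (r.getD j "")) (g j).2)) := by
  induction nrs generalizing g with
  | nil => simp
  | cons r nrs ih =>
    simp only [List.foldl_cons]
    rw [zipWith_map_range _ "" w g r (h r (List.mem_cons_self))]
    rw [ih (fun j => ((g j).1 + pyIntD (r.getD j ""), (g j).2 * pyIntD (r.getD j "")))
        (fun x hx => h x (List.mem_cons_of_mem _ hx))]

theorem evaluate_expression_col (rows : List (List String)) (h : rows ≠ []) (j : Nat) :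
    evaluate_expression (rows.map (fun r => r.getD j ""))
      = if (rows.getLast h).getD j "" = "+" then
          rows.dropLast.foldl (fun s r => s + pyIntD (r.getD j "")) 0
        else
          rows.dropLast.foldl (fun p r => p * pyIntD (r.getD j "")) 1 := by
  have hmap : rows.map (fun r => r.getD j "") ≠ [] := by simpa using h
  simp only [evaluate_expression]
  rw [PySem.List.pyGetD_neg_one _ _ hmap]
  simp only [List.getLast_map, ← List.map_dropLast, List.map_map, List.foldl_map]
  simp [Function.comp]

-- both ports, with rows generalized to an arbitrary row list
theorem core_eq (rows : List (List String)) :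
    (pyZip rows).foldl (fun total col => total + evaluate_expression col) 0
      = (List.zipWith (fun (sp : Int × Int) op => if op = "+" then sp.1 else sp.2)
          (rows.dropLast.foldl
            (fun acc row =>
              List.zipWith (fun (sp : Int × Int) t => (sp.1 + pyIntD t, sp.2 * pyIntD t)) acc row)
            (List.replicate (minLen rows) ((0 : Int), (1 : Int))))
          (PySem.List.pyGetD rows (-1) [])).foldl (· + ·) 0 := by
  cases hrows : rows with
  | nil => simp [pyZip, minLen]
  | cons r0 rs0 =>
    rw [← hrows]
    have h : rows ≠ [] := by rw [hrows]; simp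
    have hrep : List.replicate (minLen rows) ((0 : Int), (1 : Int))
        = (List.range (minLen rows)).map (fun _ => ((0 : Int), (1 : Int))) := by
      simp [List.map_const']
    rw [pyZip_eq rows h, hrep,
      foldl_rows_acc rows.dropLast (minLen rows) _
        (fun r hr => minLen_le_of_mem rows r (List.dropLast_subset _ hr)),
      PySem.List.pyGetD_neg_one _ _ h,
      zipWith_map_range _ "" (minLen rows) _ (rows.getLast h)
        (minLen_le_of_mem rows _ (List.getLast_mem h)),
      PySem.List.foldl_add (g := evaluate_expression),
      PySem.List.foldl_add (g := fun (x : Int) => x)]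
    simp only [List.map_map, zero_add]
    congr 1
    apply List.map_congr_left
    intro j _
    simp only [Function.comp_apply]
    rw [evaluate_expression_col rows h j]

-- ===== VERDICT (by name: the statement is the Claim_ definition above) =====
theorem part1_spec : Claim_equal_part1 := by
  intro data _ _
  unfold Spec_part1 part1 part1_alt
  exact core_eq (rowsOf data)
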